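-- pv_equiv track=rewrite | github.com/posl/comment_recommendation | script/split_gen/5_time/zh/118_D/7.py | solve
-- ===== SOURCE A (Python) =====
-- def solve(n, m, a):
--     m = sorted(a)
--     m.reverse()
--     ans = ""
--     while n > 0:
--         for i in range(len(m)):
--             if n >= m[i]:
--                 ans += str(m[i])
--                 n -= m[i]
--                 break
--     return ans
-- ===== SOURCE B (Python) =====
-- def solve(n, m, a):
--     out = []
--     for v in sorted(set(a), reverse=True):
--         if v >= 1 and n >= v:
--             q = n // v
--             out.append(str(v) * q)
--             n -= q * v
--     return "".join(out)
-- ===== Notes on version B (the rewrite author's own statement) =====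
-- stated objective: alternative
-- what changed: Instead of rescanning the descending list and subtracting one value per while-iteration, B makes one pass over the distinct values in descending order, taking a floor-division count and a string repetition per value.
-- outside the precondition, e.g. on solve(2, 0, [13, -1]): A returns '-1-1-1-1-1-1-1-1-1-1-113', B returns ''; on solve(38, 0, [4, -5, 8]): A returns '88884-54-58', B returns '88884'; on solve(1, 0, [2]): A does not finish within the time limit, B returns ''
import Mathlib
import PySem

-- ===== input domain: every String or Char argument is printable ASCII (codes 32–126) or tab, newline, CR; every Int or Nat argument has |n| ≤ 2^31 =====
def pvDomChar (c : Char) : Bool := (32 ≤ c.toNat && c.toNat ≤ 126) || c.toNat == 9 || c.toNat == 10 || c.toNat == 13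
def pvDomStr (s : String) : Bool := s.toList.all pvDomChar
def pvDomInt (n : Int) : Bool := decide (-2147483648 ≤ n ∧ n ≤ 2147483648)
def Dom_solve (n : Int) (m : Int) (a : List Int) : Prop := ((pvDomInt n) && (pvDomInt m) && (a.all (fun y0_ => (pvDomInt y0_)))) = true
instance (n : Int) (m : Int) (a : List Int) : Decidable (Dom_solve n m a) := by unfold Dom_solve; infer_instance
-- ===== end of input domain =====

-- B replaces A's repeated rescan-and-subtract while-loop by a single descending pass over the
-- distinct values, taking a floor-division count and a string repetition per value.


-- ===== PORT A =====
-- the inner 'for i in range(len(m)): if n >= m[i]: … break' — the first list element that is ≤ n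
def firstGE : List Int → Int → Option Int
  | [], _ => none
  | x :: xs, n => if n ≥ x then some x else firstGE xs n

-- the while-loop of A.  The two 'else ans' branches and the '1 ≤ v' test are pure totality
-- guards: Python reaches them only on inputs outside Pre_solve (a pick that is ≤ 0, on which
-- Python's loop re-runs with a non-decreasing n).
def solveLoop (S : List Int) (n : Int) (ans : String) : String :=
  if h0 : 0 < n then
    match firstGE S n with
    | some v => if h1 : 1 ≤ v then solveLoop S (n - v) (ans ++ PySem.Int.toStr v) else ans
    | none => ans
  else ans
termination_by n.toNat
decreasing_by omega

def solve (n : Int) (m : Int) (a : List Int) : String :=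
  let S := (PySem.List.sorted a (fun x => x) false).reverse
  solveLoop S n ""

-- ===== PORT B =====
-- str(v) * q : concatenation of q copies (exact: Python string repetition, empty for q ≤ 0)
def strRepeat (s : String) (q : Int) : String := PySem.Str.join "" (List.replicate q.toNat s)

-- the body of B's for-loop: state = (out, n)
def bStep (st : List String × Int) (v : Int) : List String × Int :=
  if 1 ≤ v ∧ v ≤ st.2 then
    let q := PySem.Int.floordiv st.2 v
    (st.1 ++ [strRepeat (PySem.Int.toStr v) q], st.2 - q * v)
  else st

def solve_alt (n : Int) (m : Int) (a : List Int) : String :=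
  let vs := PySem.List.sorted (PySem.Set.ofList a) (fun x => x) true
  let st := vs.foldl bStep ([], n)
  PySem.Str.join "" st.1

-- ===== PRECONDITION & SPEC =====
-- the remainder n leaves after repeatedly subtracting, largest first, every positive distinct
-- value of a that fits (one arithmetic fold; computes neither port's output)
def remStep (r v : Int) : Int := if 1 ≤ v ∧ v ≤ r then r % v else r
def pvRem (n : Int) (a : List Int) : Int :=
  (PySem.List.sorted (PySem.Set.ofList a) (fun x => x) true).foldl remStep n

-- Pre_ admits exactly the inputs on which A's greedy walk finishes using positive picks alone
-- (in particular every n ≤ 0): when the positive-greedy remainder pvRem is > 0, A either loops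
-- forever (n = 1, a = [2]) or escapes only by 'paying' with nonpositive elements, returning a
-- string containing negative entries (n = 2, a = [13, -1] gives '-1-1-1-1-1-1-1-1-1-1-113') —
-- an artefact of an unbounded walk that no closed-form condition separates from divergence.
def Pre_solve (n : Int) (m : Int) (a : List Int) : Prop := pvRem n a ≤ 0
instance (n : Int) (m : Int) (a : List Int) : Decidable (Pre_solve n m a) := by unfold Pre_solve; infer_instance
def pvWitness_solve : Int × Int × List Int := (6, 2, [1, 3])

def Spec_solve (n : Int) (m : Int) (a : List Int) (out : String) : Prop := out = solve_alt n m a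
instance (n : Int) (m : Int) (a : List Int) (out : String) : Decidable (Spec_solve n m a out) := by unfold Spec_solve; infer_instance

-- ===== CLAIM (what is proved, stated in full; the proofs are below) =====
def Claim_equal_solve : Prop := ∀ (n : Int) (m : Int) (a : List Int), Dom_solve n m a → Pre_solve n m a → Spec_solve n m a (solve n m a)

-- ===== LEMMAS AND PROOFS =====

theorem join_empty_nil : PySem.Str.join "" ([] : List String) = "" := rfl

theorem join_empty_cons (s : String) (l : List String) :
    PySem.Str.join "" (s :: l) = s ++ PySem.Str.join "" l := by
  cases l with
  | nil => simp [PySem.Str.join, PySem.Chars.join_singleton, PySem.Chars.join_nil]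
  | cons t l => simp [PySem.Str.join, PySem.Chars.join_cons_cons, String.ofList_append]

theorem join_empty_append_singleton (ps : List String) (s : String) :
    PySem.Str.join "" (ps ++ [s]) = PySem.Str.join "" ps ++ s := by
  induction ps with
  | nil => simp [join_empty_nil, join_empty_cons]
  | cons p ps ih => simp [join_empty_cons, ih, String.append_assoc]

theorem strRepeat_one (s : String) : strRepeat s 1 = s := by
  simp [strRepeat, PySem.Str.join, PySem.Chars.join_singleton]

theorem strRepeat_succ (s : String) (q : Int) (hq : 1 ≤ q) :
    strRepeat s q = s ++ strRepeat s (q - 1) := by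
  unfold strRepeat
  rw [show q.toNat = (q - 1).toNat + 1 by omega, List.replicate_succ, join_empty_cons]

-- on a descending list, the first element ≤ n is the maximal element ≤ n
theorem firstGE_max (S : List Int) (n v : Int) (hpw : S.Pairwise (· ≥ ·)) (hv : v ∈ S)
    (hvn : v ≤ n) (hmax : ∀ x ∈ S, x ≤ n → x ≤ v) : firstGE S n = some v := by
  induction S with
  | nil => simp at hv
  | cons x S ih =>
    rw [List.pairwise_cons] at hpw
    simp only [firstGE]
    by_cases hx : n ≥ x
    · have hxv : x ≤ v := hmax x (by simp) hx
      have hvx : v ≤ x := by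
        rcases List.mem_cons.mp hv with rfl | hvS
        · exact le_refl _
        · exact hpw.1 v hvS
      simp [hx]; omega
    · have hvS : v ∈ S := by
        rcases List.mem_cons.mp hv with rfl | hvS
        · omega
        · exact hvS
      simp only [hx, if_false]
      exact ih hpw.2 hvS (fun x hx' hxn => hmax x (List.mem_cons_of_mem _ hx') hxn)

-- A's loop repeatedly picks the same maximal value v until it no longer fits:
-- n // v copies in all, leaving n % v
theorem rep (k : Nat) : ∀ (S : List Int) (n v : Int) (ans : String), n.toNat ≤ k →
    S.Pairwise (· ≥ ·) → v ∈ S → 1 ≤ v → v ≤ n → (∀ x ∈ S, x ≤ n → x ≤ v) →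
    solveLoop S n ans = solveLoop S (n % v) (ans ++ strRepeat (PySem.Int.toStr v) (n / v)) := by
  induction k with
  | zero => intro S n v ans hk _ _ h1 hvn _; omega
  | succ k ih =>
    intro S n v ans hk hpw hv h1 hvn hmax
    have hn : 0 < n := by omega
    have hv0 : 0 < v := by omega
    rw [solveLoop, dif_pos hn, firstGE_max S n v hpw hv hvn hmax]
    simp only [dif_pos h1]
    by_cases hc : v ≤ n - v
    · have e1 : (n - v) % v = n % v := Int.sub_emod_right n v
      have e2 : (n - v) / v = n / v - 1 := by
        have := Int.add_mul_ediv_right n (-1) (show v ≠ 0 by omega)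
        simpa [sub_eq_add_neg] using this
      have hq1 : 1 ≤ n / v := by rw [Int.le_ediv_iff_mul_le hv0]; omega
      rw [ih S (n - v) v (ans ++ PySem.Int.toStr v) (by omega) hpw hv h1 hc
            (fun x hx hxn => hmax x hx (by omega)), e1, e2,
          strRepeat_succ (PySem.Int.toStr v) (n / v) hq1, ← String.append_assoc]
    · obtain ⟨e1, e2⟩ := (Int.ediv_emod_unique hv0).mpr
        (⟨by omega, by omega, by omega⟩ : (n - v) + v * 1 = n ∧ 0 ≤ n - v ∧ n - v < v)
      rw [e1, e2, strRepeat_one]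

theorem foldB_nonpos (vs : List Int) : ∀ (ps : List String) (n : Int), n ≤ 0 →
    vs.foldl bStep (ps, n) = (ps, n) := by
  induction vs with
  | nil => intro ps n _; rfl
  | cons v vs ih =>
    intro ps n hn
    rw [List.foldl_cons, bStep, if_neg (by simp; omega), ih ps n hn]

theorem main (S : List Int) (hpwS : S.Pairwise (· ≥ ·)) :
    ∀ (vs : List Int) (n : Int) (ps : List String),
    vs.Pairwise (· > ·) → (∀ x ∈ vs, x ∈ S) → (∀ x ∈ S, 1 ≤ x → x ≤ n → x ∈ vs) →
    0 ≤ n → vs.foldl remStep n = 0 →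
    solveLoop S n (PySem.Str.join "" ps) = PySem.Str.join "" ((vs.foldl bStep (ps, n)).1) := by
  intro vs
  induction vs with
  | nil =>
    intro n ps _ _ _ _ hrem
    simp only [List.foldl_nil] at hrem
    subst hrem
    rw [solveLoop]; simp
  | cons v vs ih =>
    intro n ps hpw hmem hsub hn hrem
    rw [List.pairwise_cons] at hpw
    rw [List.foldl_cons] at hrem
    by_cases hfit : 1 ≤ v ∧ v ≤ n
    · obtain ⟨h1v, hvn⟩ := hfit
      have hv0 : (0 : Int) < v := by omega
      rw [List.foldl_cons]
      have hfd : PySem.Int.floordiv n v = n / v := PySem.Int.floordiv_eq_ediv_of_pos hv0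
      have hmax : ∀ x ∈ S, x ≤ n → x ≤ v := by
        intro x hx hxn
        by_cases hx1 : 1 ≤ x
        · rcases List.mem_cons.mp (hsub x hx hx1 hxn) with rfl | hxvs
          · exact le_refl _
          · exact le_of_lt (hpw.1 x hxvs)
        · omega
      have hstep : bStep (ps, n) v
          = (ps ++ [strRepeat (PySem.Int.toStr v) (n / v)], n % v) := by
        rw [bStep, if_pos (by exact ⟨h1v, hvn⟩)]
        simp only [hfd]
        have : n - n / v * v = n % v := by rw [Int.emod_def]; ring
        rw [this]
      rw [hstep,
        rep n.toNat S n v _ le_rfl hpwS (hmem v (List.mem_cons_self)) h1v hvn hmax,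
        ← join_empty_append_singleton]
      have hmlt : n % v < v := Int.emod_lt_of_pos n hv0
      have hmnn : 0 ≤ n % v := Int.emod_nonneg n (by omega)
      have hrem' : vs.foldl remStep (n % v) = 0 := by
        rwa [remStep, if_pos (by exact ⟨h1v, hvn⟩)] at hrem
      exact ih (n % v) (ps ++ [strRepeat (PySem.Int.toStr v) (n / v)]) hpw.2
        (fun x hx => hmem x (List.mem_cons_of_mem _ hx))
        (fun x hx hx1 hxm => by
          rcases List.mem_cons.mp (hsub x hx hx1 (by omega)) with rfl | hxvs
          · omega
          · exact hxvs)
        hmnn hrem'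
    · rw [List.foldl_cons, bStep, if_neg (by simpa using hfit)]
      have hrem' : vs.foldl remStep n = 0 := by
        rwa [remStep, if_neg (by simpa using hfit)] at hrem
      exact ih n ps hpw.2
        (fun x hx => hmem x (List.mem_cons_of_mem _ hx))
        (fun x hx hx1 hxn => by
          rcases List.mem_cons.mp (hsub x hx hx1 hxn) with rfl | hxvs
          · exact absurd ⟨hx1, hxn⟩ hfit
          · exact hxvs)
        hn hrem'

theorem foldRem_nonneg (vs : List Int) : ∀ n : Int, 0 ≤ n → 0 ≤ vs.foldl remStep n := by
  induction vs with
  | nil => intro n hn; exact hn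
  | cons v vs ih =>
    intro n hn
    rw [List.foldl_cons, remStep]
    split_ifs with h
    · exact ih _ (Int.emod_nonneg n (by omega))
    · exact ih _ hn

-- ===== VERDICT (by name: the statement is the Claim_ definition above) =====
theorem solve_spec : Claim_equal_solve := by
  unfold Claim_equal_solve
  intro n m a _ hpre
  unfold Spec_solve solve solve_alt
  simp only []
  have hpwS : ((PySem.List.sorted a (fun x => x) false).reverse).Pairwise (· ≥ ·) :=
    List.pairwise_reverse.mpr (PySem.List.sorted_pairwise a (fun x => x))
  have hpwv : (PySem.List.sorted (PySem.Set.ofList a) (fun x => x) true).Pairwise (· > ·) := by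
    have hge := PySem.List.sorted_pairwise_rev (PySem.Set.ofList a) (fun x => x)
    have hnd : (PySem.List.sorted (PySem.Set.ofList a) (fun x => x) true).Nodup :=
      (PySem.List.sorted_perm (PySem.Set.ofList a) (fun x => x) true).nodup_iff.mpr
        (PySem.Set.nodup_ofList a)
    exact (hge.and hnd).imp (fun h => lt_of_le_of_ne h.1 (Ne.symm h.2))
  have hmemv : ∀ x : Int, x ∈ PySem.List.sorted (PySem.Set.ofList a) (fun x => x) true ↔ x ∈ a :=
    fun x => by rw [PySem.List.mem_sorted, PySem.Set.mem_ofList]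
  have hmemS : ∀ x : Int, x ∈ (PySem.List.sorted a (fun x => x) false).reverse ↔ x ∈ a :=
    fun x => by rw [List.mem_reverse, PySem.List.mem_sorted]
  by_cases hn : 0 ≤ n
  · have hrem : (PySem.List.sorted (PySem.Set.ofList a) (fun x => x) true).foldl remStep n = 0 := by
      have h1 : pvRem n a ≤ 0 := hpre
      have h2 := foldRem_nonneg (PySem.List.sorted (PySem.Set.ofList a) (fun x => x) true) n hn
      unfold pvRem at h1
      omega
    have h := main _ hpwS _ n [] hpwv
      (fun x hx => (hmemS x).mpr ((hmemv x).mp hx))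
      (fun x hx _ _ => (hmemv x).mpr ((hmemS x).mp hx))
      hn hrem
    rw [join_empty_nil] at h
    exact h
  · rw [foldB_nonpos _ [] n (by omega), solveLoop, dif_neg (show ¬ 0 < n by omega)]
    exact join_empty_nil.symm
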